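-- pv_equiv track=rewrite | github.com/tsiuri/midicrt | pages/pianoroll.py | _best_visible_columns
-- ===== SOURCE A (Python) =====
-- visible_channels = set(range(1, 17))
--
-- def _best_visible_columns(columns):
--     """Return per-column maps {pitch: (channel, velocity)} filtered by visibility."""
--     best_cols = []
--     for col_events in columns:
--         best: dict[int, tuple[int, int]] = {}
--         for (p, ch, v) in col_events:
--             if ch not in visible_channels:
--                 continue
--             prev = best.get(p)
--             if prev is None or v >= prev[1]:
--                 best[p] = (int(ch), int(v))
--         best_cols.append(best)
--     return best_cols
-- ===== SOURCE B (Python) =====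
-- def _last_max(g):
--     best = g[0]
--     for t in g[1:]:
--         if t[1] >= best[1]:
--             best = t
--     return best
--
--
-- def _best_visible_columns(columns):
--     """Two-phase: filter visible events, group them by pitch, then reduce each
--     group to its best (highest velocity, later event wins ties)."""
--     out = []
--     for col_events in columns:
--         vis = [(p, int(ch), int(v)) for (p, ch, v) in col_events if 1 <= ch <= 16]
--         groups = {}
--         for (p, ch, v) in vis:
--             groups.setdefault(p, []).append((ch, v))
--         out.append({p: _last_max(g) for p, g in groups.items()})
--     return out
-- ===== Notes on version B (the rewrite author's own statement) =====
-- stated objective: alternative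
-- what changed: Replaces A's single pass that maintains a running best-per-pitch dict with a two-phase decomposition: filter the visible events, group them by pitch, then reduce each group to its last maximal-velocity event.
import Mathlib
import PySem

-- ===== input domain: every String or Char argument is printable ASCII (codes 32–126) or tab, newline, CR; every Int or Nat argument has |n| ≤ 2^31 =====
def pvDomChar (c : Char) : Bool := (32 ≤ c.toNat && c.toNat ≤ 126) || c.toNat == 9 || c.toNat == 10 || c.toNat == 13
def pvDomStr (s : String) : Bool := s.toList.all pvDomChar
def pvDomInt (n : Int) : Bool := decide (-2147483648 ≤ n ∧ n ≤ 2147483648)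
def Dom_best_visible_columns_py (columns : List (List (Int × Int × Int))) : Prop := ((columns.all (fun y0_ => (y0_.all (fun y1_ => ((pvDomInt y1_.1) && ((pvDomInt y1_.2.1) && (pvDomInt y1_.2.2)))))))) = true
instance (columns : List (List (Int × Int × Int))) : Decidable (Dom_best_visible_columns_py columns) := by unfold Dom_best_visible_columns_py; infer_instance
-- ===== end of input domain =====

-- B replaces A's single pass with a running best-per-pitch dict by a two-phase
-- decomposition (filter visible events, group by pitch, reduce each group);
-- objective: alternative (same cost, different structure).

-- ===== PORT A =====
-- module constant: visible_channels = set(range(1, 17))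
def pvVisibleChannels : List Int := PySem.Set.ofList (PySem.List.pyRange 1 17 1)

-- the body of A's inner loop over (p, ch, v)
def pvStepA (best : PySem.Dict Int (Int × Int)) (e : Int × Int × Int) : PySem.Dict Int (Int × Int) :=
  if e.2.1 ∉ pvVisibleChannels then best            -- if ch not in visible_channels: continue
  else match best.get? e.1 with                      -- prev = best.get(p)
    | none => best.insert e.1 (e.2.1, e.2.2)         -- prev is None → best[p] = (int(ch), int(v))
    | some prev =>
        if e.2.2 ≥ prev.2 then best.insert e.1 (e.2.1, e.2.2) else best

def best_visible_columns_py (columns : List (List (Int × Int × Int))) : List (List (Int × Int × Int)) :=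
  columns.foldl
    (fun best_cols col_events =>
      best_cols ++ [(col_events.foldl pvStepA (PySem.Dict.empty : PySem.Dict Int (Int × Int))).items])
    []

-- ===== PORT B =====
-- _last_max: linear reduce of a nonempty group; later event wins velocity ties
def pvLastMax (g : List (Int × Int)) : Int × Int :=
  match g with
  | [] => (0, 0)                                     -- unreachable: groups are never empty
  | b :: t => t.foldl (fun best x => if x.2 ≥ best.2 then x else best) b

-- the body of B's grouping loop: groups.setdefault(p, []).append((ch, v))
def pvStepG (g : PySem.Dict Int (List (Int × Int))) (e : Int × Int × Int) :
    PySem.Dict Int (List (Int × Int)) :=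
  g.modify e.1 [] (fun l => l ++ [(e.2.1, e.2.2)])

def pvAltCol (col_events : List (Int × Int × Int)) : List (Int × Int × Int) :=
  let vis := (col_events.filter (fun e => decide (1 ≤ e.2.1) && decide (e.2.1 ≤ 16))).map
      (fun e => (e.1, e.2.1, e.2.2))
  let groups := vis.foldl pvStepG (PySem.Dict.empty : PySem.Dict Int (List (Int × Int)))
  groups.items.map (fun pg => (pg.1, pvLastMax pg.2))

def best_visible_columns_py_alt (columns : List (List (Int × Int × Int))) : List (List (Int × Int × Int)) :=
  columns.map pvAltCol

-- ===== PRECONDITION & SPEC =====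
def Spec_best_visible_columns_py (columns : List (List (Int × Int × Int))) (out : List (List (Int × Int × Int))) : Prop := out = best_visible_columns_py_alt columns
instance (columns : List (List (Int × Int × Int))) (out : List (List (Int × Int × Int))) : Decidable (Spec_best_visible_columns_py columns out) := by unfold Spec_best_visible_columns_py; infer_instance

-- ===== CLAIM (what is proved, stated in full; the proofs are below) =====
def Claim_equal_best_visible_columns_py : Prop := ∀ (columns : List (List (Int × Int × Int))), Dom_best_visible_columns_py columns → Spec_best_visible_columns_py columns (best_visible_columns_py columns)

-- ===== LEMMAS AND PROOFS =====

-- A's inner step without the visibility guard (proof-side helper)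
def pvStepA' (best : PySem.Dict Int (Int × Int)) (e : Int × Int × Int) : PySem.Dict Int (Int × Int) :=
  match best.get? e.1 with
  | none => best.insert e.1 (e.2.1, e.2.2)
  | some prev => if e.2.2 ≥ prev.2 then best.insert e.1 (e.2.1, e.2.2) else best

-- B's view of a group dict as A's best dict
def pvMapD (g : PySem.Dict Int (List (Int × Int))) : PySem.Dict Int (Int × Int) :=
  PySem.Dict.mk (g.items.map (fun pg => (pg.1, pvLastMax pg.2)))

theorem pvVisible_iff (x : Int) : x ∈ pvVisibleChannels ↔ 1 ≤ x ∧ x ≤ 16 := by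
  unfold pvVisibleChannels
  rw [PySem.Set.mem_ofList, PySem.List.mem_pyRange_one]
  omega

-- A's guarded fold equals the unguarded fold over the filtered events
theorem pvFoldA_filter (col : List (Int × Int × Int)) (d : PySem.Dict Int (Int × Int)) :
    col.foldl pvStepA d =
      (col.filter (fun e => decide (1 ≤ e.2.1) && decide (e.2.1 ≤ 16))).foldl pvStepA' d := by
  induction col generalizing d with
  | nil => rfl
  | cons e t ih =>
    by_cases h : 1 ≤ e.2.1 ∧ e.2.1 ≤ 16
    · have hv : e.2.1 ∈ pvVisibleChannels := (pvVisible_iff _).2 h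
      simp only [List.foldl_cons, List.filter_cons]
      rw [if_pos (by simp [h.1, h.2])]
      simp only [List.foldl_cons]
      rw [show pvStepA d e = pvStepA' d e by simp [pvStepA, pvStepA', hv]]
      exact ih _
    · have hv : e.2.1 ∉ pvVisibleChannels := fun hc => h ((pvVisible_iff _).1 hc)
      simp only [List.foldl_cons, List.filter_cons]
      rw [if_neg (by simpa using fun h1 h2 => h ⟨h1, h2⟩)]
      rw [show pvStepA d e = d by simp [pvStepA, hv]]
      exact ih _

theorem pvGet?_mapD (g : PySem.Dict Int (List (Int × Int))) (p : Int) :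
    (pvMapD g).get? p = (g.get? p).map pvLastMax := by
  obtain ⟨L⟩ := g
  induction L with
  | nil => rfl
  | cons q t ih =>
    obtain ⟨k, v⟩ := q
    simp only [pvMapD, List.map_cons, PySem.Dict.get?_mk_cons]
    by_cases h : (k == p) = true
    · rw [if_pos h, if_pos h]; rfl
    · rw [if_neg h, if_neg h]; exact ih

theorem pvMapD_items (g : PySem.Dict Int (List (Int × Int))) :
    (pvMapD g).items = g.items.map (fun pg => (pg.1, pvLastMax pg.2)) := rfl

theorem pvLastMax_append (gl : List (Int × Int)) (x : Int × Int) (h : gl ≠ []) :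
    pvLastMax (gl ++ [x]) = if x.2 ≥ (pvLastMax gl).2 then x else pvLastMax gl := by
  cases gl with
  | nil => exact absurd rfl h
  | cons b t => simp [pvLastMax, List.foldl_append]

-- one step of the two folds commutes with pvMapD
theorem pvStep_commute (g : PySem.Dict Int (List (Int × Int))) (e : Int × Int × Int)
    (hnd : g.keys.Nodup) (hne : ∀ pg ∈ g.items, pg.2 ≠ []) :
    pvStepA' (pvMapD g) e = pvMapD (pvStepG g e) := by
  have hmod : pvStepG g e = g.insert e.1 (g.getD e.1 [] ++ [(e.2.1, e.2.2)]) := rfl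
  cases hg : g.get? e.1 with
  | none =>
    have hc : g.contains e.1 = false := by
      rw [PySem.Dict.contains_eq_isSome_get?, hg]; rfl
    have hcm : (pvMapD g).contains e.1 = false := by
      rw [PySem.Dict.contains_eq_isSome_get?, pvGet?_mapD, hg]; rfl
    have hd : g.getD e.1 [] = [] := PySem.Dict.getD_of_not_contains g [] hc
    simp only [pvStepA', pvGet?_mapD, hg, Option.map_none]
    apply PySem.Dict.ext
    rw [PySem.Dict.items_insert_of_not_contains _ _ hcm, hmod, hd]
    simp only [pvMapD]
    rw [PySem.Dict.items_insert_of_not_contains _ _ hc, List.map_append]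
    simp [pvLastMax]
  | some gl =>
    have hmem : (e.1, gl) ∈ g.items := PySem.Dict.mem_items_of_get?_eq_some g hg
    have hglne : gl ≠ [] := hne _ hmem
    have hc : g.contains e.1 = true := by
      rw [PySem.Dict.contains_eq_isSome_get?, hg]; rfl
    have hcm : (pvMapD g).contains e.1 = true := by
      rw [PySem.Dict.contains_eq_isSome_get?, pvGet?_mapD, hg]; rfl
    have hgd : g.getD e.1 [] = gl := PySem.Dict.getD_of_get?_eq_some g [] hg
    have huniq : ∀ q ∈ g.items, q.1 = e.1 → q = (e.1, gl) := by
      intro q hq hk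
      have h1 : g.get? q.1 = some q.2 := PySem.Dict.get?_of_mem_items g hq hnd
      rw [hk, hg] at h1
      exact Prod.ext hk (Option.some.inj h1).symm
    simp only [pvStepA', pvGet?_mapD, hg, Option.map_some]
    rw [hmod, hgd]
    by_cases hv : e.2.2 ≥ (pvLastMax gl).2
    · rw [if_pos hv]
      apply PySem.Dict.ext
      rw [PySem.Dict.items_insert_of_contains _ _ hcm, pvMapD_items,
        pvMapD_items (g.insert e.1 (gl ++ [(e.2.1, e.2.2)])),
        PySem.Dict.items_insert_of_contains _ _ hc, List.map_map, List.map_map]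
      apply List.map_congr_left
      intro q hq
      by_cases hk : q.1 = e.1
      · have hq' : q = (e.1, gl) := huniq q hq hk
        subst hq'
        simp [Function.comp, pvLastMax_append gl _ hglne, hv]
      · simp [Function.comp, hk]
    · rw [if_neg hv]
      apply PySem.Dict.ext
      rw [pvMapD_items, pvMapD_items (g.insert e.1 (gl ++ [(e.2.1, e.2.2)])),
        PySem.Dict.items_insert_of_contains _ _ hc, List.map_map]
      apply List.map_congr_left
      intro q hq
      by_cases hk : q.1 = e.1
      · have hq' : q = (e.1, gl) := huniq q hq hk
        subst hq'
        simp [Function.comp, pvLastMax_append gl _ hglne, hv]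
      · simp [Function.comp, hk]

theorem pvStep_inv (g : PySem.Dict Int (List (Int × Int))) (e : Int × Int × Int)
    (hne : ∀ pg ∈ g.items, pg.2 ≠ []) :
    ∀ pg ∈ (pvStepG g e).items, pg.2 ≠ [] := by
  intro pg hpg
  have : pvStepG g e = g.insert e.1 (g.getD e.1 [] ++ [(e.2.1, e.2.2)]) := rfl
  rw [this] at hpg
  rcases (PySem.Dict.mem_items_insert _ _ _ _).1 hpg with h | ⟨h, _⟩
  · subst h; simp
  · exact hne _ h

theorem pvFold_commute (l : List (Int × Int × Int)) (g : PySem.Dict Int (List (Int × Int)))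
    (hnd : g.keys.Nodup) (hne : ∀ pg ∈ g.items, pg.2 ≠ []) :
    l.foldl pvStepA' (pvMapD g) = pvMapD (l.foldl pvStepG g) := by
  induction l generalizing g with
  | nil => rfl
  | cons e t ih =>
    simp only [List.foldl_cons]
    rw [pvStep_commute g e hnd hne]
    refine ih _ ?_ (pvStep_inv g e hne)
    have : (pvStepG g e).keys.Nodup := by
      have := PySem.Dict.nodup_keys_foldl_modify_key [e] (fun x => x.1) []
        (fun _ x l => l ++ [(x.2.1, x.2.2)]) g hnd
      simpa [pvStepG] using this
    exact this

theorem pvCol_eq (col : List (Int × Int × Int)) :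
    (col.foldl pvStepA (PySem.Dict.empty : PySem.Dict Int (Int × Int))).items = pvAltCol col := by
  rw [pvFoldA_filter]
  have hmap : (col.filter (fun e => decide (1 ≤ e.2.1) && decide (e.2.1 ≤ 16))).map
      (fun (e : Int × Int × Int) => (e.1, e.2.1, e.2.2)) =
      col.filter (fun e => decide (1 ≤ e.2.1) && decide (e.2.1 ≤ 16)) := by
    simp
  have h0 : (PySem.Dict.empty : PySem.Dict Int (Int × Int)) =
      pvMapD (PySem.Dict.empty : PySem.Dict Int (List (Int × Int))) := rfl
  rw [h0, pvFold_commute _ _ (by simp) (by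
    intro pg h
    rw [show (PySem.Dict.empty : PySem.Dict Int (List (Int × Int))).items = [] from rfl] at h
    simp at h)]
  simp only [pvAltCol, hmap, pvMapD]

-- ===== VERDICT (by name: the statement is the Claim_ definition above) =====
theorem best_visible_columns_py_spec : Claim_equal_best_visible_columns_py := by
  intro columns _
  unfold Spec_best_visible_columns_py best_visible_columns_py best_visible_columns_py_alt
  rw [PySem.List.foldl_append_singleton_eq_map (fun col_events =>
    (col_events.foldl pvStepA (PySem.Dict.empty : PySem.Dict Int (Int × Int))).items) columns []]
  simp only [List.nil_append]
  exact List.map_congr_left fun col _ => pvCol_eq col
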